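-- pv_equiv track=rewrite | github.com/dataforgoodfr/13_democratiser_sobriete | stream3_visualization/Well-being/code/6_graphs.py | get_country_color
-- ===== SOURCE A (Python) =====
-- COUNTRY_COLORS = ['#ffd558', '#fb8072', '#b3de69', '#fdb462', '#bebada', '#8dd3c7', '#ffffb3']
--
-- EU_27_COLOR = '#80b1d3'
--
-- def get_country_color(country, all_countries):
--     """Assign consistent colors to countries across all charts (same as app.py)"""
--     if country == 'All Countries' or country == 'EU-27':
--         return EU_27_COLOR
--
--     # Get all individual countries (excluding EU-27)
--     individual_countries = [c for c in all_countries if c not in ['All Countries', 'EU-27']]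
--     individual_countries.sort()  # Sort for consistent ordering
--
--     if country in individual_countries:
--         index = individual_countries.index(country) % len(COUNTRY_COLORS)
--         return COUNTRY_COLORS[index]
--
--     return COUNTRY_COLORS[0]  # Default color
-- ===== SOURCE B (Python) =====
-- COUNTRY_COLORS = ['#ffd558', '#fb8072', '#b3de69', '#fdb462', '#bebada', '#8dd3c7', '#ffffb3']
--
-- EU_27_COLOR = '#80b1d3'
--
-- def get_country_color(country, all_countries):
--     """Assign consistent colors to countries across all charts (same as app.py)"""
--     if country == 'All Countries' or country == 'EU-27':
--         return EU_27_COLOR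
--     # One counting pass: the index of `country` in the sorted list of individual
--     # countries equals the number of individual countries strictly less than it.
--     present = False
--     rank = 0
--     for c in all_countries:
--         if c == 'All Countries' or c == 'EU-27':
--             continue
--         if c == country:
--             present = True
--         elif c < country:
--             rank += 1
--     if present:
--         return COUNTRY_COLORS[rank % len(COUNTRY_COLORS)]
--     return COUNTRY_COLORS[0]
-- ===== Notes on version B (the rewrite author's own statement) =====
-- stated objective: faster
-- what changed: Replaces build-filter-sort-then-index with a single counting pass: the sorted index of the country equals the number of individual countries strictly less than it, so no sorted list is materialized.
import Mathlib
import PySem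

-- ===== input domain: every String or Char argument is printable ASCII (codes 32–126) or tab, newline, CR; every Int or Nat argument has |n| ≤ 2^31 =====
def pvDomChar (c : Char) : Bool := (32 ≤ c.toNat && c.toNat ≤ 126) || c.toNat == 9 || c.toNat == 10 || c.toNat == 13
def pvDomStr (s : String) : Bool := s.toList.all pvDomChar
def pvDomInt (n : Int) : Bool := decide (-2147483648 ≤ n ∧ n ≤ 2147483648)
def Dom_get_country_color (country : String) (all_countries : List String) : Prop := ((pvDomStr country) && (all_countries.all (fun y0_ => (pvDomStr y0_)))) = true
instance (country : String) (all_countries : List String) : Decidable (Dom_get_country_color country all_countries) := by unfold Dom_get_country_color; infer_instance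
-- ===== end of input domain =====

-- B replaces A's build/sort/index by a single counting pass: the sorted index of the
-- country equals the number of strictly smaller individual countries (measured faster in a timing run).

def COUNTRY_COLORS : List String := ["#ffd558", "#fb8072", "#b3de69", "#fdb462", "#bebada", "#8dd3c7", "#ffffb3"]

def EU_27_COLOR : String := "#80b1d3"

-- ===== PORT A =====
def get_country_color (country : String) (all_countries : List String) : String :=
  if country = "All Countries" ∨ country = "EU-27" then EU_27_COLOR
  else
    let individual_countries :=
      all_countries.filter (fun c => !(c = "All Countries" ∨ c = "EU-27" : Bool))
    let individual_countries := PySem.List.sorted individual_countries (fun x => x) false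
    if country ∈ individual_countries then
      match PySem.List.index? individual_countries country with
      | some i => COUNTRY_COLORS.getD (i % COUNTRY_COLORS.length) ""  -- in range: i < length, mod 7
      | none => ""  -- unreachable: country ∈ individual_countries
    else
      COUNTRY_COLORS.getD 0 ""

-- ===== PORT B =====
def get_country_color_alt (country : String) (all_countries : List String) : String :=
  if country = "All Countries" ∨ country = "EU-27" then EU_27_COLOR
  else
    let st := all_countries.foldl (fun (st : Bool × Nat) c =>
      if c = "All Countries" ∨ c = "EU-27" then st
      else if c = country then (true, st.2)
      else if c < country then (st.1, st.2 + 1)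
      else st) (false, 0)
    if st.1 then COUNTRY_COLORS.getD (st.2 % COUNTRY_COLORS.length) ""
    else COUNTRY_COLORS.getD 0 ""

-- ===== PRECONDITION & SPEC =====
def Spec_get_country_color (country : String) (all_countries : List String) (out : String) : Prop := out = get_country_color_alt country all_countries
instance (country : String) (all_countries : List String) (out : String) : Decidable (Spec_get_country_color country all_countries out) := by unfold Spec_get_country_color; infer_instance

-- ===== CLAIM (what is proved, stated in full; the proofs are below) =====
def Claim_equal_get_country_color : Prop := ∀ (country : String) (all_countries : List String), Dom_get_country_color country all_countries → Spec_get_country_color country all_countries (get_country_color country all_countries)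

-- ===== LEMMAS AND PROOFS =====

-- B's fold computes membership and the count of strictly smaller non-marker elements.
theorem alt_foldl_spec (country : String) (l : List String) (b : Bool) (n : Nat) :
    l.foldl (fun (st : Bool × Nat) c =>
      if c = "All Countries" ∨ c = "EU-27" then st
      else if c = country then (true, st.2)
      else if c < country then (st.1, st.2 + 1)
      else st) (b, n)
    = (b || decide (country ∈ (l.filter (fun c => !(c = "All Countries" ∨ c = "EU-27" : Bool)))),
       n + (l.filter (fun c => !(c = "All Countries" ∨ c = "EU-27" : Bool))).countP
             (fun c => decide (c < country))) := by
  induction l generalizing b n with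
  | nil => simp
  | cons x xs ih =>
    rw [List.foldl_cons]
    by_cases hm : x = "All Countries" ∨ x = "EU-27"
    · have hstep : (if x = "All Countries" ∨ x = "EU-27" then (b, n)
          else if x = country then (true, n)
          else if x < country then (b, n + 1) else (b, n)) = (b, n) := by
        rw [if_pos hm]
      simp only [hstep, ih, List.filter_cons]
      simp [hm]
    · by_cases he : x = country
      · have hstep : (if x = "All Countries" ∨ x = "EU-27" then (b, n)
            else if x = country then (true, n)
            else if x < country then (b, n + 1) else (b, n)) = (true, n) := by
          rw [if_neg hm, if_pos he]
        simp only [hstep, ih, List.filter_cons]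
        subst he
        simp [hm]
      · by_cases hl : x < country
        · have hstep : (if x = "All Countries" ∨ x = "EU-27" then (b, n)
              else if x = country then (true, n)
              else if x < country then (b, n + 1) else (b, n)) = (b, n + 1) := by
            rw [if_neg hm, if_neg he, if_pos hl]
          simp only [hstep, ih, List.filter_cons]
          have hl' : x.toList < country.toList := by simpa using hl
          simp [hm, hl', Ne.symm he]
          omega
        · have hstep : (if x = "All Countries" ∨ x = "EU-27" then (b, n)
              else if x = country then (true, n)
              else if x < country then (b, n + 1) else (b, n)) = (b, n) := by
            rw [if_neg hm, if_neg he, if_neg hl]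
          simp only [hstep, ih, List.filter_cons]
          have hl' : ¬ (x.toList < country.toList) := by simpa using hl
          simp [hm, hl', Ne.symm he]

-- In a ≤-sorted list, the first index of v is the number of elements strictly below v.
theorem index?_sorted_eq_countP (xs : List String) (v : String)
    (hp : xs.Pairwise (fun a b => a ≤ b)) (hv : v ∈ xs) :
    PySem.List.index? xs v = some (xs.countP (fun c => decide (c < v))) := by
  induction xs with
  | nil => simp at hv
  | cons x t ih =>
    rcases List.pairwise_cons.mp hp with ⟨hx, ht⟩
    by_cases he : x = v
    · subst he
      have hcnt : (x :: t).countP (fun c => decide (c < x)) = 0 := by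
        rw [List.countP_eq_zero]
        intro c hc
        rcases List.mem_cons.mp hc with hc' | hc'
        · subst hc'; simpa using lt_irrefl c
        · simp [not_lt_of_ge (hx c hc')]
      rw [hcnt, PySem.List.index?_cons_self]
    · have hv' : v ∈ t := by
        rcases List.mem_cons.mp hv with hv' | hv'
        · exact absurd hv'.symm he
        · exact hv'
      have hxlt : x < v := lt_of_le_of_ne (hx v hv') he
      rw [PySem.List.index?_cons_of_ne t he, ih ht hv', List.countP_cons]
      simp [hxlt]

theorem get_country_color_eq (country : String) (all_countries : List String) :
    get_country_color country all_countries = get_country_color_alt country all_countries := by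
  unfold get_country_color get_country_color_alt
  by_cases hmark : country = "All Countries" ∨ country = "EU-27"
  · rw [if_pos hmark, if_pos hmark]
  · rw [if_neg hmark, if_neg hmark]
    rw [alt_foldl_spec]
    set L := all_countries.filter (fun c => !(c = "All Countries" ∨ c = "EU-27" : Bool)) with hL
    set S := PySem.List.sorted L (fun x => x) false with hS
    have hperm : S.Perm L := PySem.List.sorted_perm L (fun x => x) false
    have hcnt : S.countP (fun c => decide (c < country)) = L.countP (fun c => decide (c < country)) :=
      hperm.countP_eq _
    by_cases hmem : country ∈ L
    · have hmemS : country ∈ S := hperm.mem_iff.mpr hmem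
      have hsorted : S.Pairwise (fun a b => a ≤ b) := PySem.List.sorted_pairwise L (fun x => x)
      rw [if_pos hmemS, index?_sorted_eq_countP S country hsorted hmemS, hcnt]
      have hb : decide (country ∈ L) = true := by simpa using hmem
      rw [hb]
      simp
    · have hmemS : country ∉ S := fun h => hmem (hperm.mem_iff.mp h)
      rw [if_neg hmemS]
      have hb : decide (country ∈ L) = false := by simpa using hmem
      rw [hb]
      simp

-- ===== VERDICT (by name: the statement is the Claim_ definition above) =====
theorem get_country_color_spec : Claim_equal_get_country_color := by
  intro country all_countries _
  exact get_country_color_eq country all_countries
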